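-- pv_equiv track=rewrite | github.com/faiz687/CodingProblems | TripleSum.py | TripleSum
-- ===== SOURCE A (Python) =====
-- def TripleSum(a,b,c):
--     connections = {}
--     for i in range(len(b)):
--         if b[i] in connections:
--             continue
--         for j in range(b[i]+1):
--             if j in c:
--                 if b[i] in connections:
--                     connections[b[i]] = connections[b[i]] + 1
--                 else:
--                     connections[b[i]] =  1
--     triplets = 0
--     for i in range(len(a)):
--         for j in connections:
--             if  a[i] <= j:
--                 triplets += connections[j]
--     return triplets
-- ===== SOURCE B (Python) =====
-- def TripleSum(a, b, c):
--     cs = set(c)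
--     total = 0
--     for k in set(b):
--         cnt = sum(1 for j in cs if 0 <= j <= k)
--         total += cnt * sum(1 for x in a if x <= k)
--     return total
-- ===== Notes on version B (the rewrite author's own statement) =====
-- stated objective: faster
-- what changed: B replaces A's dict built by scanning every integer j in range(b[i]+1) with a list-membership test (pseudo-polynomial in max(b)) by one pass over set(b) that counts matching set(c) members directly and multiplies by the count of qualifying a-elements, eliminating both the value-sized range scan and the dict.
import Mathlib
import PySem

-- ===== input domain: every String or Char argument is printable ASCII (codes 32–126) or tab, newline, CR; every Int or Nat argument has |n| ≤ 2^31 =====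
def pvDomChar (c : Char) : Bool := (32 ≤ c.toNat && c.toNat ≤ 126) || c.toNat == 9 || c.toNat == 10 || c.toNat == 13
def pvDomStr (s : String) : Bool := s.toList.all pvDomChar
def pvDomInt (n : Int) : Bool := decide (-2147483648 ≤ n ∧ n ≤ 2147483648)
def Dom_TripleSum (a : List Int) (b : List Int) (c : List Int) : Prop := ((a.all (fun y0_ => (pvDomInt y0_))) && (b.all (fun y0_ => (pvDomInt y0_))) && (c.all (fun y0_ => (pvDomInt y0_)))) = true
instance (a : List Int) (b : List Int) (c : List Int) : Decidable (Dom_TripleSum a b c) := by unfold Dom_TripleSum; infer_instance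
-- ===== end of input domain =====

-- B replaces A's per-value range scan and dict by a single pass over set(b) with direct
-- counting over set(c) and a multiplication; the return values are proved identical.

-- ===== PORT A =====
def TripleSum (a : List Int) (b : List Int) (c : List Int) : Int :=
  -- first loop: build `connections`
  let connections : PySem.Dict Int Int :=
    (PySem.List.pyRange 0 (b.length : Int) 1).foldl (fun conn i =>
      let bi := PySem.List.pyGetD b i 0
      if conn.contains bi then conn   -- continue
      else
        (PySem.List.pyRange 0 (bi + 1) 1).foldl (fun conn2 j =>
          if c.contains j then
            if conn2.contains bi then conn2.insert bi (conn2.getD bi 0 + 1)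
            else conn2.insert bi 1
          else conn2) conn) PySem.Dict.empty
  -- second loop: count triplets
  (PySem.List.pyRange 0 (a.length : Int) 1).foldl (fun triplets i =>
    let ai := PySem.List.pyGetD a i 0
    connections.keys.foldl (fun t j =>
      if ai ≤ j then t + connections.getD j 0 else t) triplets) 0

-- ===== PORT B =====
def TripleSum_alt (a : List Int) (b : List Int) (c : List Int) : Int :=
  let cs := PySem.Set.ofList c
  (PySem.Set.ofList b).foldl (fun total k =>
    let cnt : Int := cs.foldl (fun n j => if 0 ≤ j ∧ j ≤ k then n + 1 else n) 0
    total + cnt * (a.foldl (fun m x => if x ≤ k then m + 1 else m) 0)) 0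

-- ===== PRECONDITION & SPEC =====
def Spec_TripleSum (a : List Int) (b : List Int) (c : List Int) (out : Int) : Prop := out = TripleSum_alt a b c
instance (a : List Int) (b : List Int) (c : List Int) (out : Int) : Decidable (Spec_TripleSum a b c out) := by unfold Spec_TripleSum; infer_instance

-- ===== CLAIM (what is proved, stated in full; the proofs are below) =====
def Claim_equal_TripleSum : Prop := ∀ (a : List Int) (b : List Int) (c : List Int), Dom_TripleSum a b c → Spec_TripleSum a b c (TripleSum a b c)

-- ===== LEMMAS AND PROOFS =====

-- count of integers j in [0, k] that occur in c (what A's inner loop accumulates)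
def pvCnt (c : List Int) (k : Int) : Nat :=
  (PySem.List.pyRange 0 (k + 1) 1).countP (fun j => c.contains j)

-- the distinct b-values A's dict ends up holding (first-occurrence order)
def pvKeys (c : List Int) (b : List Int) : List Int :=
  (PySem.Set.ofList b).filter (fun k => !(pvCnt c k == 0))

-- A's inner loop, characterised
theorem pv_inner_loop (c : List Int) (bi : Int) (L : List Int) (d : PySem.Dict Int Int) :
    L.foldl (fun conn2 j =>
      if c.contains j then
        if conn2.contains bi then conn2.insert bi (conn2.getD bi 0 + 1)
        else conn2.insert bi 1
      else conn2) d
    = if L.countP (fun j => c.contains j) = 0 then d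
      else d.insert bi (d.getD bi 0 + (L.countP (fun j => c.contains j) : Int)) := by
  induction L generalizing d with
  | nil => simp
  | cons j L ih =>
    have hstep : ∀ e : PySem.Dict Int Int,
        (if e.contains bi = true then e.insert bi (e.getD bi 0 + 1) else e.insert bi 1)
          = e.insert bi (e.getD bi 0 + 1) := by
      intro e
      by_cases hc : e.contains bi = true
      · simp [hc]
      · have h0 : e.getD bi 0 = 0 :=
          PySem.Dict.getD_of_not_contains e 0 (by simpa using hc)
        simp [hc, h0]
    by_cases hj : c.contains j = true
    · rw [List.foldl_cons, if_pos hj, hstep, ih, List.countP_cons, if_pos hj]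
      rw [if_neg (by omega : ¬ (L.countP (fun j => c.contains j) + 1 = 0))]
      by_cases hm : L.countP (fun j => c.contains j) = 0
      · rw [if_pos hm, hm]
        norm_num
      · rw [if_neg hm, PySem.Dict.getD_insert_self, PySem.Dict.insert_insert_self]
        congr 1
        push_cast
        ring
    · rw [List.foldl_cons, if_neg hj, ih, List.countP_cons]
      have hjc : j ∉ c := by simpa using hj
      simp [hjc]

-- A's outer dict-building loop, characterised
theorem pv_outer_loop (c : List Int) (b : List Int) :
    b.foldl (fun conn bi =>
      if conn.contains bi then conn
      else
        (PySem.List.pyRange 0 (bi + 1) 1).foldl (fun conn2 j =>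
          if c.contains j then
            if conn2.contains bi then conn2.insert bi (conn2.getD bi 0 + 1)
            else conn2.insert bi 1
          else conn2) conn) PySem.Dict.empty
    = PySem.Dict.mk ((pvKeys c b).map (fun k => (k, (pvCnt c k : Int)))) := by
  induction b using List.reverseRecOn with
  | nil => rfl
  | append_singleton b k ih =>
    rw [List.foldl_append, List.foldl_cons, List.foldl_nil, ih]
    have hkeys : (PySem.Dict.mk ((pvKeys c b).map (fun k => (k, (pvCnt c k : Int))))).keys
        = pvKeys c b := by
      rw [PySem.Dict.keys_mk, List.map_map]; simp [Function.comp_def]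
    have hcont : ∀ x : Int,
        (PySem.Dict.mk ((pvKeys c b).map (fun k => (k, (pvCnt c k : Int))))).contains x
          = decide (x ∈ pvKeys c b) := by
      intro x; rw [PySem.Dict.contains_eq_decide_mem_keys, hkeys]
    have hkeysApp : pvKeys c (b ++ [k])
        = if k ∈ b ∨ pvCnt c k = 0 then pvKeys c b else pvKeys c b ++ [k] := by
      unfold pvKeys
      rw [PySem.Set.ofList_append_singleton]
      by_cases hkb : k ∈ b
      · rw [PySem.Set.add_of_mem (by simpa [PySem.Set.mem_ofList] using hkb)]
        rw [if_pos (Or.inl hkb)]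
      · rw [PySem.Set.add_of_not_mem (by simpa [PySem.Set.mem_ofList] using hkb)]
        rw [List.filter_append]
        by_cases h0 : pvCnt c k = 0
        · rw [if_pos (Or.inr h0)]; simp [h0]
        · rw [if_neg (by tauto)]; simp [h0]
    by_cases hmem : k ∈ pvKeys c b
    · rw [hcont k, if_pos (by simpa using hmem)]
      have hkb : k ∈ b := by
        have := List.mem_filter.mp hmem
        simpa [PySem.Set.mem_ofList] using this.1
      rw [hkeysApp, if_pos (Or.inl hkb)]
    · have hcf : (PySem.Dict.mk ((pvKeys c b).map (fun k => (k, (pvCnt c k : Int))))).contains k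
          = false := by rw [hcont k]; simpa using hmem
      rw [hcont k, if_neg (by simpa using hmem)]
      rw [pv_inner_loop]
      have hpc : (PySem.List.pyRange 0 (k + 1) 1).countP (fun j => c.contains j) = pvCnt c k := rfl
      rw [hpc]
      by_cases h0 : pvCnt c k = 0
      · rw [if_pos h0, hkeysApp, if_pos (Or.inr h0)]
      · rw [if_neg h0, hkeysApp]
        have hkb : k ∉ b := by
          intro hkb
          exact hmem (List.mem_filter.mpr ⟨by simpa [PySem.Set.mem_ofList] using hkb, by simpa using h0⟩)
        rw [if_neg (by tauto)]
        have hg : (PySem.Dict.mk ((pvKeys c b).map (fun k => (k, (pvCnt c k : Int))))).getD k 0 = 0 :=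
          PySem.Dict.getD_of_not_contains _ 0 hcf
        rw [hg]
        apply PySem.Dict.ext
        rw [PySem.Dict.items_insert_of_not_contains _ _ hcf]
        simp

theorem pv_keys_nodup (c b : List Int) : (pvKeys c b).Nodup := by
  exact (PySem.Set.nodup_ofList b).filter _

-- generic counting/sum helpers
theorem pv_foldl_if_add (l : List Int) (g : Int → Int) (p : Int → Prop) [DecidablePred p] (t : Int) :
    l.foldl (fun t' j => if p j then t' + g j else t') t
      = t + (l.map (fun j => if p j then g j else 0)).sum := by
  induction l generalizing t with
  | nil => simp
  | cons x l ih =>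
    simp only [List.foldl_cons, List.map_cons, List.sum_cons, ih]
    by_cases hx : p x <;> simp [hx] <;> ring

theorem pv_foldl_add (l : List Int) (g : Int → Int) (t : Int) :
    l.foldl (fun t' j => t' + g j) t = t + (l.map g).sum := by
  induction l generalizing t with
  | nil => simp
  | cons x l ih => simp only [List.foldl_cons, List.map_cons, List.sum_cons, ih]; ring

theorem pv_sum_ite_const {p : Int → Prop} [DecidablePred p] (v : Int) (l : List Int) :
    (l.map (fun x => if p x then v else 0)).sum = v * (l.countP (fun x => decide (p x)) : Int) := by
  induction l with
  | nil => simp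
  | cons x l ih =>
    simp only [List.map_cons, List.sum_cons, List.countP_cons, ih]
    by_cases hx : p x <;> simp [hx] <;> push_cast <;> ring

theorem pv_sum_map_add (g h : Int → Int) (l : List Int) :
    (l.map (fun y => g y + h y)).sum = (l.map g).sum + (l.map h).sum := by
  induction l with
  | nil => simp
  | cons y l ih => simp only [List.map_cons, List.sum_cons, ih]; ring

theorem pv_sum_comm (f : Int → Int → Int) (l1 l2 : List Int) :
    (l1.map (fun x => (l2.map (fun y => f x y)).sum)).sum
      = (l2.map (fun y => (l1.map (fun x => f x y)).sum)).sum := by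
  induction l1 with
  | nil =>
    simp only [List.map_nil, List.sum_nil]
    induction l2 with
    | nil => simp
    | cons y l2 ih => simp only [List.map_cons, List.sum_cons, List.map_nil, List.sum_nil, ← ih]; ring
  | cons x l1 ih =>
    simp only [List.map_cons, List.sum_cons, ih, pv_sum_map_add]

theorem pv_sum_filter_zero (q : Int → Bool) (h : Int → Int) (l : List Int)
    (hz : ∀ k ∈ l, q k = false → h k = 0) :
    ((l.filter q).map h).sum = (l.map h).sum := by
  induction l with
  | nil => simp
  | cons x l ih =>
    have ihx := ih (fun k hk => hz k (List.mem_cons_of_mem _ hk))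
    by_cases hx : q x = true
    · simp [hx, ihx]
    · have h0 : h x = 0 := hz x (List.mem_cons_self) (by simpa using hx)
      simp [hx, ihx, h0]

-- the two ways of counting {j : 0 ≤ j ≤ k, j ∈ c} agree
theorem pv_count_eq (c : List Int) (k : Int) :
    (PySem.Set.ofList c).countP (fun j => decide (0 ≤ j ∧ j ≤ k)) = pvCnt c k := by
  have h1 : ((PySem.Set.ofList c).filter (fun j => decide (0 ≤ j ∧ j ≤ k))).Nodup :=
    (PySem.Set.nodup_ofList c).filter _
  have h2 : ((PySem.List.pyRange 0 (k + 1) 1).filter (fun j => c.contains j)).Nodup :=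
    (PySem.List.nodup_pyRange_one 0 (k + 1)).filter _
  have hp : ∀ x, x ∈ (PySem.Set.ofList c).filter (fun j => decide (0 ≤ j ∧ j ≤ k)) ↔
      x ∈ (PySem.List.pyRange 0 (k + 1) 1).filter (fun j => c.contains j) := by
    intro x
    simp only [List.mem_filter, PySem.Set.mem_ofList, PySem.List.mem_pyRange_one,
      decide_eq_true_eq, List.contains_eq_mem]
    constructor
    · rintro ⟨hx, h0, hk⟩; exact ⟨⟨h0, by omega⟩, by simpa using hx⟩
    · rintro ⟨⟨h0, hk⟩, hx⟩; exact ⟨by simpa using hx, h0, by omega⟩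
  have hperm := (List.perm_ext_iff_of_nodup h1 h2).mpr hp
  simpa [pvCnt, List.countP_eq_length_filter] using hperm.length_eq

-- ===== VERDICT (by name: the statement is the Claim_ definition above) =====
theorem TripleSum_spec : Claim_equal_TripleSum := by
  intro a b c _
  show TripleSum a b c = TripleSum_alt a b c
  simp only [TripleSum, TripleSum_alt]
  rw [PySem.List.foldl_pyRange_zero_pyGetD' b (0 : Int)
      (fun (conn : PySem.Dict Int Int) (bi : Int) =>
        if conn.contains bi = true then conn
        else
          (PySem.List.pyRange 0 (bi + 1) 1).foldl (fun conn2 j =>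
            if c.contains j = true then
              if conn2.contains bi = true then conn2.insert bi (conn2.getD bi 0 + 1)
              else conn2.insert bi 1
            else conn2) conn)
      PySem.Dict.empty,
    pv_outer_loop,
    PySem.List.foldl_pyRange_zero_pyGetD' a (0 : Int)
      (fun (triplets : Int) (ai : Int) =>
        (PySem.Dict.mk ((pvKeys c b).map (fun k => (k, (pvCnt c k : Int))))).keys.foldl
          (fun t j =>
            if ai ≤ j then
              t + (PySem.Dict.mk ((pvKeys c b).map (fun k => (k, (pvCnt c k : Int))))).getD j 0
            else t) triplets)
      (0 : Int)]
  have hkeys : (PySem.Dict.mk ((pvKeys c b).map (fun k => (k, (pvCnt c k : Int))))).keys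
      = pvKeys c b := by
    rw [PySem.Dict.keys_mk, List.map_map]; simp [Function.comp_def]
  rw [hkeys]
  have hgetD : ∀ j ∈ pvKeys c b,
      (PySem.Dict.mk ((pvKeys c b).map (fun k => (k, (pvCnt c k : Int))))).getD j 0
        = (pvCnt c j : Int) := by
    intro j hj
    refine PySem.Dict.getD_of_mem_items _ ?_ (by rw [hkeys]; exact pv_keys_nodup c b) 0
    exact List.mem_map.mpr ⟨j, hj, rfl⟩
  simp only [pv_foldl_if_add, pv_foldl_add, pv_sum_ite_const, one_mul, pv_count_eq, zero_add]
  calc (a.map (fun x => ((pvKeys c b).map (fun j =>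
          if x ≤ j then (PySem.Dict.mk ((pvKeys c b).map (fun k => (k, (pvCnt c k : Int))))).getD j 0
          else 0)).sum)).sum
      = (a.map (fun x => ((pvKeys c b).map (fun j =>
          if x ≤ j then (pvCnt c j : Int) else 0)).sum)).sum := by
        refine congrArg List.sum (List.map_congr_left fun x _ => ?_)
        refine congrArg List.sum (List.map_congr_left fun j hj => ?_)
        rw [hgetD j hj]
    _ = ((pvKeys c b).map (fun j => (a.map (fun x =>
          if x ≤ j then (pvCnt c j : Int) else 0)).sum)).sum :=
        pv_sum_comm (fun x j => if x ≤ j then (pvCnt c j : Int) else 0) a (pvKeys c b)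
    _ = ((pvKeys c b).map (fun j =>
          (pvCnt c j : Int) * (a.countP (fun x => decide (x ≤ j)) : Int))).sum := by
        refine congrArg List.sum (List.map_congr_left fun j _ => ?_)
        exact pv_sum_ite_const (pvCnt c j : Int) a
    _ = ((PySem.Set.ofList b).map (fun k =>
          (pvCnt c k : Int) * (a.countP (fun x => decide (x ≤ k)) : Int))).sum := by
        refine pv_sum_filter_zero _ _ _ ?_
        intro k _ hq
        have : pvCnt c k = 0 := by simpa using hq
        simp [this]
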